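-- pv_equiv track=rewrite | github.com/PavlovMN/keys3 | main.py | find_sum_between_max_min
-- ===== SOURCE A (Python) =====
-- def find_sum_between_max_min(arr):
--     """
--     Находит сумму отрицательных элементов между максимальным и минимальным элементами массива.
--
--     Args:
--         arr: одномерный массив чисел
--
--     Returns:
--         int: сумма отрицательных элементов между max и min
--     """
--     if len(arr) == 0:
--         return 0
--
--     # Находим индексы максимального и минимального элементов
--     max_index = arr.index(max(arr))
--     min_index = arr.index(min(arr))
--
--     # Определяем границы для поиска
--     start = min(max_index, min_index)
--     end = max(max_index, min_index)
--
--     # Находим сумму отрицательных элементов между ними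
--     sum_negative = 0
--     for i in range(start + 1, end):  # +1 чтобы не включать сами max/min элементы
--         if arr[i] < 0:
--             sum_negative += arr[i]
--
--     return sum_negative
-- ===== SOURCE B (Python) =====
-- def find_sum_between_max_min(arr):
--     if not arr:
--         return 0
--     # prefix sums of negative elements: pref[i] = sum of negatives in arr[:i]
--     pref = [0]
--     run = 0
--     for x in arr:
--         if x < 0:
--             run += x
--         pref.append(run)
--     # one pass for the extrema with first-occurrence indices
--     mv = nv = arr[0]
--     mi = ni = 0
--     for i in range(1, len(arr)):
--         x = arr[i]
--         if x > mv:
--             mv, mi = x, i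
--         if x < nv:
--             nv, ni = x, i
--     lo, hi = (mi, ni) if mi < ni else (ni, mi)
--     # answer in O(1) by prefix-sum subtraction instead of a summation loop
--     return pref[hi] - pref[lo + 1] if hi > lo else 0
-- ===== Notes on version B (the rewrite author's own statement) =====
-- stated objective: alternative
-- what changed: B builds a prefix-sum array of the negative elements, so the answer between the extrema positions is obtained by one O(1) subtraction pref[hi]-pref[lo+1] instead of A's second indexed summation loop; the extrema positions themselves come from one manual pass instead of A's four builtin traversals (max, min, two .index scans).
import Mathlib
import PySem

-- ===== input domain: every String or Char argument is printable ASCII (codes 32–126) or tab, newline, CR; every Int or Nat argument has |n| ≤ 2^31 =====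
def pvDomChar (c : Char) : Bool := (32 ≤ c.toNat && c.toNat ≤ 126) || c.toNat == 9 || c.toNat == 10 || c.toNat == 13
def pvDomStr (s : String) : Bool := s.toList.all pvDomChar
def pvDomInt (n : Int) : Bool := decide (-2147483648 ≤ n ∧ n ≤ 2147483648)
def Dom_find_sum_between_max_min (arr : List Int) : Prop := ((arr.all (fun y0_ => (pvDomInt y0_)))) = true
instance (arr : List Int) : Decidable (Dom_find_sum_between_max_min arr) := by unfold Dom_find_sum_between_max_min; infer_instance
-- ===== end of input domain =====

-- B builds a prefix-sum array of the negative elements so the between-extrema sum becomes one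
-- O(1) subtraction instead of A's second indexed summation loop; extrema indices come from one
-- manual pass instead of A's four builtin traversals (alternative decomposition, same cost).


-- ===== PORT A =====
-- literal transliteration: max(arr)/min(arr), arr.index(...), then an index loop;
-- the .getD 0 defaults are never taken (arr is nonempty in that branch, max/min are members)
def find_sum_between_max_min (arr : List Int) : Int :=
  if arr.length = 0 then 0
  else
    let mx := (PySem.List.max? arr (fun y => y)).getD 0
    let mn := (PySem.List.min? arr (fun y => y)).getD 0
    let maxIndex := (PySem.List.index? arr mx).getD 0
    let minIndex := (PySem.List.index? arr mn).getD 0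
    let start := min maxIndex minIndex
    let e := max maxIndex minIndex
    (PySem.List.pyRange ((start : Int) + 1) (e : Int) 1).foldl
      (fun acc i => if PySem.List.pyGetD arr i 0 < 0 then acc + PySem.List.pyGetD arr i 0 else acc) 0

-- ===== PORT B =====
-- Source B's prefix loop: running total of the negatives, one list entry appended per element
def pvPref : List Int → Int → List Int
  | [], _ => []
  | x :: t, run =>
    let run' := if x < 0 then run + x else run
    run' :: pvPref t run'

-- Source B's extrema loop: i is the index of x; returns ((max value, first index), (min value, first index))
def pvScan : List Int → Nat → Int → Nat → Int → Nat → (Int × Nat) × (Int × Nat)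
  | [], _, mv, mi, nv, ni => ((mv, mi), (nv, ni))
  | x :: t, i, mv, mi, nv, ni =>
    pvScan t (i + 1) (if x > mv then x else mv) (if x > mv then i else mi)
                     (if x < nv then x else nv) (if x < nv then i else ni)

def find_sum_between_max_min_alt : List Int → Int
  | [] => 0
  | a :: t =>
    let pref := (0 : Int) :: pvPref (a :: t) 0
    let r := pvScan t 1 a 0 a 0
    let lohi : Nat × Nat := if r.1.2 < r.2.2 then (r.1.2, r.2.2) else (r.2.2, r.1.2)
    if lohi.1 < lohi.2 then
      PySem.List.pyGetD pref (lohi.2 : Int) 0 - PySem.List.pyGetD pref ((lohi.1 : Int) + 1) 0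
    else 0

-- ===== PRECONDITION & SPEC =====
def Spec_find_sum_between_max_min (arr : List Int) (out : Int) : Prop := out = find_sum_between_max_min_alt arr
instance (arr : List Int) (out : Int) : Decidable (Spec_find_sum_between_max_min arr out) := by unfold Spec_find_sum_between_max_min; infer_instance

-- ===== CLAIM (what is proved, stated in full; the proofs are below) =====
def Claim_equal_find_sum_between_max_min : Prop := ∀ (arr : List Int), Dom_find_sum_between_max_min arr → Spec_find_sum_between_max_min arr (find_sum_between_max_min arr)

-- ===== LEMMAS AND PROOFS =====

-- the scan invariant: processing t after a processed prefix p (whose running extrema and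
-- first-occurrence indices are the accumulators) yields the extrema of p ++ t with their first indices
theorem pvScan_spec (t : List Int) : ∀ (p : List Int) (mv nv : Int) (mi ni : Nat),
    PySem.List.index? p mv = some mi → (∀ y ∈ p, y ≤ mv) →
    PySem.List.index? p nv = some ni → (∀ y ∈ p, nv ≤ y) →
    (pvScan t p.length mv mi nv ni).1.1 = t.foldl max mv ∧
    PySem.List.index? (p ++ t) (t.foldl max mv) = some (pvScan t p.length mv mi nv ni).1.2 ∧
    (pvScan t p.length mv mi nv ni).2.1 = t.foldl min nv ∧
    PySem.List.index? (p ++ t) (t.foldl min nv) = some (pvScan t p.length mv mi nv ni).2.2 := by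
  induction t with
  | nil =>
    intro p mv nv mi ni hmi hub hni hlb
    exact ⟨rfl, by simpa using hmi, rfl, by simpa using hni⟩
  | cons x t ih =>
    intro p mv nv mi ni hmi hub hni hlb
    have hmv_mem : mv ∈ p := (PySem.List.index?_isSome_iff p mv).1 (by rw [hmi]; rfl)
    have hnv_mem : nv ∈ p := (PySem.List.index?_isSome_iff p nv).1 (by rw [hni]; rfl)
    have hlen : p.length + 1 = (p ++ [x]).length := by simp
    have happ : (p ++ [x]) ++ t = p ++ x :: t := by simp
    have key : ∀ (mv' nv' : Int) (mi' ni' : Nat),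
        PySem.List.index? (p ++ [x]) mv' = some mi' → (∀ y ∈ p ++ [x], y ≤ mv') →
        PySem.List.index? (p ++ [x]) nv' = some ni' → (∀ y ∈ p ++ [x], nv' ≤ y) →
        (pvScan t (p.length + 1) mv' mi' nv' ni').1.1 = t.foldl max mv' ∧
        PySem.List.index? (p ++ x :: t) (t.foldl max mv') = some (pvScan t (p.length + 1) mv' mi' nv' ni').1.2 ∧
        (pvScan t (p.length + 1) mv' mi' nv' ni').2.1 = t.foldl min nv' ∧
        PySem.List.index? (p ++ x :: t) (t.foldl min nv') = some (pvScan t (p.length + 1) mv' mi' nv' ni').2.2 := by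
      intro mv' nv' mi' ni' h1 h2 h3 h4
      rw [hlen]
      have := ih (p ++ [x]) mv' nv' mi' ni' h1 h2 h3 h4
      rwa [happ] at this
    by_cases hx : x > mv <;> by_cases hn : x < nv
    · simp only [pvScan, if_pos hx, if_pos hn]
      have hxnp : x ∉ p := fun hxp => absurd (hub x hxp) (by omega)
      have h1 := PySem.List.index?_append_singleton_self p x hxnp
      have h3 := PySem.List.index?_append_singleton_self p x hxnp
      have res := key x x p.length p.length h1
        (by intro y hy; rcases List.mem_append.1 hy with h | h
            · exact le_of_lt (lt_of_le_of_lt (hub y h) hx)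
            · simp at h; omega)
        h3
        (by intro y hy; rcases List.mem_append.1 hy with h | h
            · exact le_of_lt (lt_of_lt_of_le hn (hlb y h))
            · simp at h; omega)
      simpa [List.foldl_cons, max_eq_right (le_of_lt hx), min_eq_right (le_of_lt hn)] using res
    · simp only [pvScan, if_pos hx, if_neg hn]
      have hxnp : x ∉ p := fun hxp => absurd (hub x hxp) (by omega)
      have res := key x nv p.length ni
        (PySem.List.index?_append_singleton_self p x hxnp)
        (by intro y hy; rcases List.mem_append.1 hy with h | h
            · exact le_of_lt (lt_of_le_of_lt (hub y h) hx)
            · simp at h; omega)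
        (by rw [PySem.List.index?_append_of_mem [x] hnv_mem]; exact hni)
        (by intro y hy; rcases List.mem_append.1 hy with h | h
            · exact hlb y h
            · simp at h; omega)
      simpa [List.foldl_cons, max_eq_right (le_of_lt hx), min_eq_left (by omega : nv ≤ x)] using res
    · simp only [pvScan, if_neg hx, if_pos hn]
      have hxnp : x ∉ p := fun hxp => absurd (hlb x hxp) (by omega)
      have res := key mv x mi p.length
        (by rw [PySem.List.index?_append_of_mem [x] hmv_mem]; exact hmi)
        (by intro y hy; rcases List.mem_append.1 hy with h | h
            · exact hub y h
            · simp at h; omega)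
        (PySem.List.index?_append_singleton_self p x hxnp)
        (by intro y hy; rcases List.mem_append.1 hy with h | h
            · exact le_of_lt (lt_of_lt_of_le hn (hlb y h))
            · simp at h; omega)
      simpa [List.foldl_cons, max_eq_left (by omega : x ≤ mv), min_eq_right (le_of_lt hn)] using res
    · simp only [pvScan, if_neg hx, if_neg hn]
      have res := key mv nv mi ni
        (by rw [PySem.List.index?_append_of_mem [x] hmv_mem]; exact hmi)
        (by intro y hy; rcases List.mem_append.1 hy with h | h
            · exact hub y h
            · simp at h; omega)
        (by rw [PySem.List.index?_append_of_mem [x] hnv_mem]; exact hni)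
        (by intro y hy; rcases List.mem_append.1 hy with h | h
            · exact hlb y h
            · simp at h; omega)
      simpa [List.foldl_cons, max_eq_left (by omega : x ≤ mv), min_eq_left (by omega : nv ≤ x)] using res

theorem pvPref_length (l : List Int) : ∀ run : Int, (pvPref l run).length = l.length := by
  induction l with
  | nil => intro run; rfl
  | cons x t ih => intro run; simp [pvPref, ih]

-- the prefix list: entry j is run + (sum of negatives among the first j+1 elements)
theorem pvPref_get (l : List Int) : ∀ (run : Int) (j : Nat) (hj : j < l.length),
    (pvPref l run)[j]'(by rw [pvPref_length]; exact hj)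
      = run + ((l.take (j + 1)).filter (fun x => decide (x < 0))).sum := by
  induction l with
  | nil => intro run j hj; simp at hj
  | cons x t ih =>
    intro run j hj
    match j with
    | 0 =>
      by_cases hx : x < 0 <;> simp [pvPref, hx]
    | j + 1 =>
      have hj' : j < t.length := by simpa using hj
      by_cases hx : x < 0 <;>
        simp [pvPref, hx, ih _ j hj', add_assoc]
  
-- summation loop = sum of the negative elements
theorem foldl_if_neg_sum (l : List Int) : ∀ (acc : Int),
    l.foldl (fun acc x => if x < 0 then acc + x else acc) acc
      = acc + (l.filter (fun x => decide (x < 0))).sum := by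
  induction l with
  | nil => intro acc; simp
  | cons x t ih =>
    intro acc
    by_cases hx : x < 0
    · simp [List.foldl_cons, hx, ih]; ring
    · simp [List.foldl_cons, hx, ih]

-- A's index-summation loop over [s+1, e) equals the filtered-slice sum, given e ≤ len arr
theorem sum_loop_eq_slice (arr : List Int) (s e : Nat) (he : e ≤ arr.length) :
    (PySem.List.pyRange ((s : Int) + 1) (e : Int) 1).foldl
      (fun acc i => if PySem.List.pyGetD arr i 0 < 0 then acc + PySem.List.pyGetD arr i 0 else acc) 0
    = (((arr.take e).drop (s + 1)).filter (fun x => decide (x < 0))).sum := by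
  have hcong : (PySem.List.pyRange ((s : Int) + 1) (e : Int) 1).foldl
      (fun acc i => if PySem.List.pyGetD arr i 0 < 0 then acc + PySem.List.pyGetD arr i 0 else acc) 0
      = (PySem.List.pyRange ((s : Int) + 1) (e : Int) 1).foldl
      (fun acc i => if PySem.List.pyGetD (arr.take e) i 0 < 0 then acc + PySem.List.pyGetD (arr.take e) i 0 else acc) 0 := by
    apply PySem.List.foldl_congr_mem
    intro acc i hi
    have hmem := (PySem.List.mem_pyRange_one).1 hi
    have h0 : 0 ≤ i := by omega
    have hie : i < (e : Int) := hmem.2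
    have h1 : PySem.List.pyGetD arr i 0 = PySem.List.pyGetD (arr.take e) i 0 := by
      rw [PySem.List.pyGetD_eq_getElem arr 0 h0 (by omega),
          PySem.List.pyGetD_eq_getElem (arr.take e) 0 h0
            (by simp [List.length_take, Nat.min_eq_left he]; omega)]
      rw [List.getElem_take]
    rw [h1]
  have hlen : ((e : Int)) = PySem.List.len (arr.take e) := by
    simp [PySem.List.len, List.length_take, Nat.min_eq_left he]
  have hcast : ((s : Int) + 1) = ((s + 1 : Nat) : Int) := by push_cast; ring
  rw [hcong, hcast, hlen]
  rw [PySem.List.foldl_pyRange_pyGetD (arr.take e) (0 : Int)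
    (fun acc x => if x < 0 then acc + x else acc) (0 : Int) (by positivity)]
  rw [foldl_if_neg_sum]
  simp

-- pref[hi] - pref[lo+1] is the filtered sum of the strict-between slice (lo < hi ≤ n)
theorem pref_diff_eq (arr : List Int) (lo hi : Nat) (hlh : lo < hi) (hhi : hi ≤ arr.length) :
    PySem.List.pyGetD ((0 : Int) :: pvPref arr 0) (hi : Int) 0
      - PySem.List.pyGetD ((0 : Int) :: pvPref arr 0) ((lo : Int) + 1) 0
    = (((arr.take hi).drop (lo + 1)).filter (fun x => decide (x < 0))).sum := by
  have hlenp : ((0 : Int) :: pvPref arr 0).length = arr.length + 1 := by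
    simp [pvPref_length]
  have hget : ∀ (i : Nat), i ≤ arr.length →
      PySem.List.pyGetD ((0 : Int) :: pvPref arr 0) (i : Int) 0
        = ((arr.take i).filter (fun x => decide (x < 0))).sum := by
    intro i hi
    rw [PySem.List.pyGetD_eq_getElem _ 0 (by positivity) (by simp [hlenp]; omega)]
    match i with
    | 0 => simp
    | j + 1 =>
      have hj : j < arr.length := by omega
      simp only [Int.toNat_natCast, List.getElem_cons_succ]
      rw [pvPref_get arr 0 j hj]
      ring
  have hcast : ((lo : Int) + 1) = ((lo + 1 : Nat) : Int) := by push_cast; ring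
  rw [hcast, hget hi hhi, hget (lo + 1) (by omega)]
  have hsplit : arr.take hi = (arr.take hi).take (lo + 1) ++ (arr.take hi).drop (lo + 1) :=
    (List.take_append_drop _ _).symm
  have htt : (arr.take hi).take (lo + 1) = arr.take (lo + 1) := by
    rw [List.take_take]; congr 1; omega
  have hkey : ((arr.take hi).filter (fun x => decide (x < 0))).sum
      = ((arr.take (lo + 1)).filter (fun x => decide (x < 0))).sum
          + (((arr.take hi).drop (lo + 1)).filter (fun x => decide (x < 0))).sum := by
    conv_lhs => rw [hsplit]
    rw [htt, List.filter_append, List.sum_append]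
  omega

-- ===== VERDICT (by name: the statement is the Claim_ definition above) =====
theorem find_sum_between_max_min_spec : Claim_equal_find_sum_between_max_min := by
  intro arr _
  unfold Spec_find_sum_between_max_min
  match arr with
  | [] => rfl
  | a :: t =>
    obtain ⟨h1, h2, h3, h4⟩ := by
      have := pvScan_spec t [a] a a 0 0
        (by simp) (by simp)
        (by simp) (by simp)
      simpa using this
    set r := pvScan t 1 a 0 a 0 with hr
    obtain ⟨hK, -, -⟩ := PySem.List.getElem_of_index?_eq_some h2
    obtain ⟨hL, -, -⟩ := PySem.List.getElem_of_index?_eq_some h4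
    have hA : find_sum_between_max_min (a :: t)
        = (PySem.List.pyRange (((min r.1.2 r.2.2 : Nat) : Int) + 1) ((max r.1.2 r.2.2 : Nat) : Int) 1).foldl
            (fun acc i => if PySem.List.pyGetD (a :: t) i 0 < 0
              then acc + PySem.List.pyGetD (a :: t) i 0 else acc) 0 := by
      unfold find_sum_between_max_min
      rw [if_neg (by simp)]
      simp only [PySem.List.max?_id_cons, PySem.List.min?_id_cons,
        PySem.List.index?_eq_idxOf?, h2, h4, Option.getD_some]
    have hse1 : (if r.1.2 < r.2.2 then (r.1.2, r.2.2) else (r.2.2, r.1.2)).1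
        = min r.1.2 r.2.2 := by split <;> omega
    have hse2 : (if r.1.2 < r.2.2 then (r.1.2, r.2.2) else (r.2.2, r.1.2)).2
        = max r.1.2 r.2.2 := by split <;> omega
    have hB : find_sum_between_max_min_alt (a :: t)
        = if min r.1.2 r.2.2 < max r.1.2 r.2.2 then
            PySem.List.pyGetD ((0 : Int) :: pvPref (a :: t) 0) ((max r.1.2 r.2.2 : Nat) : Int) 0
              - PySem.List.pyGetD ((0 : Int) :: pvPref (a :: t) 0) (((min r.1.2 r.2.2 : Nat) : Int) + 1) 0
          else 0 := by
      simp only [find_sum_between_max_min_alt]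
      rw [← hr, hse1, hse2]
    rw [hA, hB]
    rw [sum_loop_eq_slice (a :: t) (min r.1.2 r.2.2) (max r.1.2 r.2.2) (by omega)]
    by_cases hlh : min r.1.2 r.2.2 < max r.1.2 r.2.2
    · rw [if_pos hlh, pref_diff_eq (a :: t) _ _ hlh (by omega)]
    · rw [if_neg hlh]
      have heq : max r.1.2 r.2.2 = min r.1.2 r.2.2 := by omega
      rw [heq]
      simp [List.drop_take]
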